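-- pv_equiv track=rewrite | github.com/confluentinc/ksql | topology_diff.py | parse_topology
-- ===== SOURCE A (Python) =====
-- def normalize_line(line: str) -> str:
--     """Normalize line by replacing PROCESSVALUES with TRANSFORMVALUES and standardizing arrows."""
--     line = line.replace("PROCESSVALUES", "TRANSFORMVALUES")
--     # Remove arrow prefixes for consistent comparison
--     if line.startswith("-->"):
--         line = line[3:].strip()
--     elif line.startswith("<--"):
--         line = line[3:].strip()
--     return line
--
-- def clean_line(line: str) -> str:
--     """Clean a line by removing any PEEK processor references."""
--     if "PEEK" in line:
--         # If line contains multiple processors (e.g., "-> Processor1, PEEK-123, Processor2")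
--         parts = [p.strip() for p in line.split(',')]
--         cleaned_parts = [p for p in parts if "PEEK" not in p and "none" not in p]
--         return ', '.join(cleaned_parts) if cleaned_parts else ""
--     return line if "none" not in line else ""
--
-- def parse_topology(lines: list, normalize: bool = False) -> dict:
--     """Parse topology file into a dictionary of sub-topologies."""
--     subtops = {}
--     current_subtop = None
--
--     for line in lines:
--         if "Sub-topology: " in line:
--             current_subtop = line.split("Sub-topology: ")[1].strip()
--             subtops[current_subtop] = []
--         elif current_subtop is not None and line.strip():
--             # Clean and normalize the line
--             cleaned_line = clean_line(line.strip())
--             if cleaned_line:  # Only add if there's content after cleaning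
--                 if normalize:
--                     cleaned_line = normalize_line(cleaned_line)
--                 else:
--                     cleaned_line = normalize_line(cleaned_line)  # Always normalize arrows
--                 subtops[current_subtop].append(cleaned_line)
--
--     return subtops
-- ===== SOURCE B (Python) =====
-- def normalize_line(line: str) -> str:
--     line = line.replace("PROCESSVALUES", "TRANSFORMVALUES")
--     if line.startswith("-->"):
--         line = line[3:].strip()
--     elif line.startswith("<--"):
--         line = line[3:].strip()
--     return line
--
-- def clean_line(line: str) -> str:
--     if "PEEK" in line:
--         parts = [p.strip() for p in line.split(',')]
--         cleaned_parts = [p for p in parts if "PEEK" not in p and "none" not in p]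
--         return ', '.join(cleaned_parts) if cleaned_parts else ""
--     return line if "none" not in line else ""
--
-- def parse_topology(lines: list, normalize: bool = False) -> dict:
--     """Two-phase: partition lines into labelled sections, then build each
--     section's list with comprehensions (normalize is a no-op in the original)."""
--     sections = []
--     for line in lines:
--         if "Sub-topology: " in line:
--             sections.append((line.split("Sub-topology: ")[1].strip(), []))
--         elif sections:
--             sections[-1][1].append(line)
--     result = {}
--     for key, body in sections:
--         cleaned = [clean_line(s) for s in map(str.strip, body) if s]
--         result[key] = [normalize_line(c) for c in cleaned if c]
--     return result
-- ===== Notes on version B (the rewrite author's own statement) =====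
-- stated objective: alternative
-- what changed: Replaces A's single stateful loop (dict + current-section pointer, per-line conditional append) by a two-phase decomposition: first partition the lines into labelled sections, then build each section's value with a filter/map comprehension pipeline, dropping A's dead normalize branch.
import Mathlib
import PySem

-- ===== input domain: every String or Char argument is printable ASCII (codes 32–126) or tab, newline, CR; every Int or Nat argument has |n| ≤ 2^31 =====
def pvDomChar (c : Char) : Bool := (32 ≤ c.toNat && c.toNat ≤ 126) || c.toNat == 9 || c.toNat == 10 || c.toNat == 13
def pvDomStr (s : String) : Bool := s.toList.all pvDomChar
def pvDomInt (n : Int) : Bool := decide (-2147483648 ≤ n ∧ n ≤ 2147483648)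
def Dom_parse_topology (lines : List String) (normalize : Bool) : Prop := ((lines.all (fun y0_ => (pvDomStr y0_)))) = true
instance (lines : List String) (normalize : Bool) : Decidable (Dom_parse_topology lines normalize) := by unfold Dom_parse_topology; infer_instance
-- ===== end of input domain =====

-- B is the same parsing as A but decomposed in two phases (partition into sections,
-- then a comprehension per section) instead of A's single stateful loop.

-- ===== PORT A =====
-- module helper normalize_line (shared by both Pythons)
def normalize_line_port (line : String) : String :=
  let line := PySem.Str.replace line "PROCESSVALUES" "TRANSFORMVALUES"
  if PySem.Str.startswith line "-->" then
    PySem.Str.strip (PySem.Str.slice line (some 3) none)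
  else if PySem.Str.startswith line "<--" then
    PySem.Str.strip (PySem.Str.slice line (some 3) none)
  else line

-- module helper clean_line (shared by both Pythons)
def clean_line_port (line : String) : String :=
  if PySem.Str.isIn "PEEK" line then
    let parts := ((PySem.Str.split? line ",").getD []).map PySem.Str.strip
    let cleaned_parts := parts.filter
      (fun p => !(PySem.Str.isIn "PEEK" p) && !(PySem.Str.isIn "none" p))
    if cleaned_parts ≠ [] then PySem.Str.join ", " cleaned_parts else ""
  else if PySem.Str.isIn "none" line then "" else line

-- line.split("Sub-topology: ")[1].strip(): split? is some (sep is a nonempty literal)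
-- and the [1] index always exists because the
-- branch is guarded by '"Sub-topology: " in line' (so the split has ≥ 2 parts);
-- the .getD "" default is therefore never taken on the guarded branch.
def subtopKey (line : String) : String :=
  PySem.Str.strip ((PySem.List.pyGet? ((PySem.Str.split? line "Sub-topology: ").getD []) 1).getD "")

-- A's for-loop over lines, state = (subtops dict, current_subtop).
-- subtops[current].append(v) = re-store the looked-up list with v appended
-- (current is always a key of subtops when this branch runs, so getD's default
-- is never taken on reachable states).
def loopA (lines : List String) (normalize : Bool)
    (subtops : PySem.Dict String (List String)) (current : Option String) :
    PySem.Dict String (List String) :=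
  match lines with
  | [] => subtops
  | line :: rest =>
    if PySem.Str.isIn "Sub-topology: " line then
      let cur := subtopKey line
      loopA rest normalize (subtops.insert cur []) (some cur)
    else
      match current with
      | some c =>
        if PySem.Str.strip line ≠ "" then
          let cleaned := clean_line_port (PySem.Str.strip line)
          if cleaned ≠ "" then
            -- A's dead branch kept literally: both arms normalize
            let cleaned := if normalize then normalize_line_port cleaned
                           else normalize_line_port cleaned
            loopA rest normalize (subtops.insert c (subtops.getD c [] ++ [cleaned])) (some c)
          else loopA rest normalize subtops (some c)
        else loopA rest normalize subtops (some c)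
      | none => loopA rest normalize subtops none

def parse_topology (lines : List String) (normalize : Bool) : List (String × List String) :=
  (loopA lines normalize PySem.Dict.empty none).items

-- ===== PORT B =====
-- [normalize_line(c) for c in [clean_line(s) for s in map(str.strip, body) if s] if c]
def processBody (body : List String) : List String :=
  ((((body.map PySem.Str.strip).filter (fun s => s ≠ "")).map clean_line_port).filter
    (fun c => c ≠ "")).map normalize_line_port

-- phase 1: partition the lines into labelled sections (sections[-1][1].append(line))
def stepB (secs : List (String × List String)) (line : String) :
    List (String × List String) :=
  if PySem.Str.isIn "Sub-topology: " line then
    secs ++ [(subtopKey line, [])]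
  else
    match secs.getLast? with
    | some kb => secs.dropLast ++ [(kb.1, kb.2 ++ [line])]
    | none => secs

-- phase 2: result[key] = processed body, in section order
def buildB (secs : List (String × List String))
    (d : PySem.Dict String (List String)) : PySem.Dict String (List String) :=
  secs.foldl (fun d kb => d.insert kb.1 (processBody kb.2)) d

def parse_topology_alt (lines : List String) (normalize : Bool) :
    List (String × List String) :=
  (buildB (lines.foldl stepB []) PySem.Dict.empty).items

-- ===== PRECONDITION & SPEC =====
def Spec_parse_topology (lines : List String) (normalize : Bool) (out : List (String × List String)) : Prop := out = parse_topology_alt lines normalize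
instance (lines : List String) (normalize : Bool) (out : List (String × List String)) : Decidable (Spec_parse_topology lines normalize out) := by unfold Spec_parse_topology; infer_instance

-- ===== CLAIM (what is proved, stated in full; the proofs are below) =====
def Claim_equal_parse_topology : Prop := ∀ (lines : List String) (normalize : Bool), Dom_parse_topology lines normalize → Spec_parse_topology lines normalize (parse_topology lines normalize)

-- ===== LEMMAS AND PROOFS =====

-- appending one line to a section's body extends its processed list by 0 or 1 entries
theorem processBody_append (b : List String) (l : String) :
    processBody (b ++ [l]) =
      processBody b ++
        (if PySem.Str.strip l ≠ "" then
           (if clean_line_port (PySem.Str.strip l) ≠ "" then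
              [normalize_line_port (clean_line_port (PySem.Str.strip l))]
            else [])
         else []) := by
  simp only [processBody, List.map_append, List.filter_append, List.map_cons, List.map_nil,
    List.filter_cons]
  split_ifs <;> simp_all

-- stepB only touches the tail of a nonempty accumulator, and keeps it nonempty
theorem stepB_append (prev rest : List (String × List String)) (line : String)
    (h : rest ≠ []) : stepB (prev ++ rest) line = prev ++ stepB rest line := by
  unfold stepB
  by_cases hh : PySem.Str.isIn "Sub-topology: " line = true
  · rw [if_pos hh, if_pos hh, List.append_assoc]
  · rw [if_neg hh, if_neg hh, List.getLast?_append_of_ne_nil _ h,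
      List.getLast?_eq_some_getLast h, List.dropLast_append_of_ne_nil h]
    simp

theorem stepB_ne_nil (rest : List (String × List String)) (line : String)
    (h : rest ≠ []) : stepB rest line ≠ [] := by
  unfold stepB
  by_cases hh : PySem.Str.isIn "Sub-topology: " line = true
  · rw [if_pos hh]; simp
  · rw [if_neg hh, List.getLast?_eq_some_getLast h]
    simp

theorem foldl_stepB_append (lines : List String) (prev rest : List (String × List String))
    (h : rest ≠ []) :
    lines.foldl stepB (prev ++ rest) = prev ++ lines.foldl stepB rest := by
  induction lines generalizing rest with
  | nil => rfl
  | cons line tl ih =>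
    simp only [List.foldl_cons, stepB_append prev rest line h]
    exact ih _ (stepB_ne_nil rest line h)

theorem buildB_cons (k : String) (b : List String) (secs : List (String × List String))
    (d : PySem.Dict String (List String)) :
    buildB ((k, b) :: secs) d = buildB secs (d.insert k (processBody b)) := rfl

-- main invariant: an open section (c, pend) on B's side corresponds to A having
-- already stored the processed pending lines under c
theorem loopA_eq_buildB (lines : List String) (normalize : Bool)
    (d : PySem.Dict String (List String)) (c : String) (pend : List String) :
    loopA lines normalize (d.insert c (processBody pend)) (some c)
      = buildB (lines.foldl stepB [(c, pend)]) d := by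
  induction lines generalizing d c pend with
  | nil => rfl
  | cons line rest ih =>
    simp only [List.foldl_cons]
    rw [loopA]
    by_cases hh : PySem.Str.isIn "Sub-topology: " line = true
    · rw [if_pos hh,
        show stepB [(c, pend)] line = [(c, pend)] ++ [(subtopKey line, [])] from by
          unfold stepB; rw [if_pos hh],
        foldl_stepB_append rest [(c, pend)] [(subtopKey line, [])] (by simp)]
      show loopA rest normalize
          ((d.insert c (processBody pend)).insert (subtopKey line) [])
          (some (subtopKey line))
        = buildB ((c, pend) :: rest.foldl stepB [(subtopKey line, [])]) d
      rw [buildB_cons]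
      exact ih (d.insert c (processBody pend)) (subtopKey line) []
    · rw [if_neg hh,
        show stepB [(c, pend)] line = [(c, pend ++ [line])] from by
          unfold stepB; rw [if_neg hh]; rfl]
      by_cases hs : PySem.Str.strip line ≠ ""
      · rw [if_pos hs]
        by_cases hc : clean_line_port (PySem.Str.strip line) ≠ ""
        · rw [if_pos hc]
          have hP : processBody (pend ++ [line])
              = processBody pend
                ++ [normalize_line_port (clean_line_port (PySem.Str.strip line))] := by
            rw [processBody_append, if_pos hs, if_pos hc]
          rw [PySem.Dict.getD_insert_self]
          show loopA rest normalize
              ((d.insert c (processBody pend)).insert c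
                (processBody pend ++
                  [if normalize = true
                     then normalize_line_port (clean_line_port (PySem.Str.strip line))
                     else normalize_line_port (clean_line_port (PySem.Str.strip line))]))
              (some c)
            = buildB (rest.foldl stepB [(c, pend ++ [line])]) d
          rw [ite_self, PySem.Dict.insert_insert_self, ← hP]
          exact ih d c (pend ++ [line])
        · rw [if_neg hc]
          have hP : processBody (pend ++ [line]) = processBody pend := by
            rw [processBody_append, if_pos hs, if_neg hc, List.append_nil]
          rw [show processBody pend = processBody (pend ++ [line]) from hP.symm]
          exact ih d c (pend ++ [line])
      · rw [if_neg hs]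
        have hP : processBody (pend ++ [line]) = processBody pend := by
          rw [processBody_append, if_neg hs, List.append_nil]
        rw [show processBody pend = processBody (pend ++ [line]) from hP.symm]
        exact ih d c (pend ++ [line])

theorem loopA_none_eq (lines : List String) (normalize : Bool)
    (d : PySem.Dict String (List String)) :
    loopA lines normalize d none = buildB (lines.foldl stepB []) d := by
  induction lines generalizing d with
  | nil => rfl
  | cons line rest ih =>
    simp only [List.foldl_cons]
    rw [loopA]
    by_cases hh : PySem.Str.isIn "Sub-topology: " line = true
    · rw [if_pos hh,
        show stepB [] line = [(subtopKey line, [])] from by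
          unfold stepB; rw [if_pos hh]; rfl]
      exact loopA_eq_buildB rest normalize d (subtopKey line) []
    · rw [if_neg hh, show stepB [] line = [] from by unfold stepB; rw [if_neg hh]; rfl]
      exact ih d

-- ===== VERDICT (by name: the statement is the Claim_ definition above) =====
theorem parse_topology_spec : Claim_equal_parse_topology := by
  intro lines normalize _
  unfold Spec_parse_topology parse_topology parse_topology_alt
  rw [loopA_none_eq]
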